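-- pv_equiv track=rewrite | github.com/timothydmorton/pixell_viz | actpol/catalogs.py | get_basenames
-- ===== SOURCE A (Python) =====
-- def get_basenames(ubername='ACTPol', bands=[148], fields=['D5', 'D6', 'D56'],
--                   PAs=['PA1', 'PA2'], Ss=['S1', 'S2'], ways=[1, 4]):
--     names = []
--     for band in bands:
--         for field in fields:
--             for PA in PAs:
--                 for S in Ss:
--                     if (S == 'S2' or PA == 'PA2') and (field != 'D56'):
--                         continue
--                     for way in ways:
--                         if way == 1:
--                             args = [ubername, band, field, PA, S,
--                                     '{}way'.format(way)]
--                             name = '{}_' * len(args)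
--                             name = name[:-1].format(*args)
--                             names.append(name)
--                         else:
--                             for i in range(way):
--                                 split = 'split{}'.format(i)
--                                 args = [ubername, band, field, PA, S,
--                                         '{}way'.format(way), split]
--                                 name = '{}_' * len(args)
--                                 name = name[:-1].format(*args)
--                                 names.append(name)
--     return names
-- ===== SOURCE B (Python) =====
-- def get_basenames(ubername='ACTPol', bands=[148], fields=['D5', 'D6', 'D56'],
--                   PAs=['PA1', 'PA2'], Ss=['S1', 'S2'], ways=[1, 4]):
--     # Stage 1: flat way/split token table.
--     toks = []
--     for way in ways:
--         if way == 1: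
--             toks.append('{}way'.format(way))
--         else:
--             toks += ['{}way_split{}'.format(way, i) for i in range(way)]
--     # Stage 2: band-independent suffix table; the skip-filter is pushed into
--     # the per-field choice of admissible PA/S lists (for field != 'D56' the
--     # skipped combinations are exactly those with PA == 'PA2' or S == 'S2').
--     suffixes = []
--     for field in fields:
--         pas = PAs if field == 'D56' else [p for p in PAs if p != 'PA2']
--         ss = Ss if field == 'D56' else [s for s in Ss if s != 'S2']
--         suffixes += ['_'.join((field, pa, s, t))
--                      for pa in pas for s in ss for t in toks]
--     # Stage 3: prefix each suffix with ubername and band.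
--     return ['{}_{}_{}'.format(ubername, band, suf)
--             for band in bands for suf in suffixes]
-- ===== Notes on version B (the rewrite author's own statement) =====
-- stated objective: alternative
-- what changed: B is a three-stage pipeline: it precomputes the way/split token table, then builds a band-independent suffix table in which the continue-filter is replaced by per-field prefiltering of the PA and S lists (for field != 'D56' the skipped tuples are exactly those with PA=='PA2' or S=='S2'), and finally prefixes each suffix with ubername and band; A instead rebuilds every name from scratch inside five nested loops with an inline skip test and a repeated format template.
import Mathlib
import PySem

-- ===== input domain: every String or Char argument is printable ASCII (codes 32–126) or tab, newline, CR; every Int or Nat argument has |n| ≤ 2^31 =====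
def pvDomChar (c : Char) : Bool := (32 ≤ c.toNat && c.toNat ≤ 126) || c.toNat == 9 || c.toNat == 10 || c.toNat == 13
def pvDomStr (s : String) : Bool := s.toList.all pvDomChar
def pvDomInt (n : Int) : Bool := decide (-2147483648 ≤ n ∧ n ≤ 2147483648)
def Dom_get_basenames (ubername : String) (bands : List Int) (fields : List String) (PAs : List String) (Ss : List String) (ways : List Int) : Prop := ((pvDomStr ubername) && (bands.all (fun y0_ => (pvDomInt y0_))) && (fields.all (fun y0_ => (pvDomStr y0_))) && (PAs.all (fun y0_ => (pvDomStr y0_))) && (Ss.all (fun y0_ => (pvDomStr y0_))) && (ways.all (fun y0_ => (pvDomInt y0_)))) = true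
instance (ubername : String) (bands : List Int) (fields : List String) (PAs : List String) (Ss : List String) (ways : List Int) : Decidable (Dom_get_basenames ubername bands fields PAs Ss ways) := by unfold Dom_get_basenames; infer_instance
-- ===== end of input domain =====

-- B replaces A's five nested loops with an inline skip test by a three-stage pipeline:
-- a way/split token table, a band-independent suffix table in which the filter becomes
-- per-field prefiltering of the PA and S lists, and a final band-prefixing pass (objective: alternative).

-- ===== PORT A =====
-- A builds each name as '{}_'*len(args) trimmed and formatted, i.e. the args joined by '_';
-- ported as the corresponding explicit '_'-separated concatenation.
def get_basenames (ubername : String) (bands : List Int) (fields : List String) (PAs : List String) (Ss : List String) (ways : List Int) : List String :=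
  bands.foldl (fun names band =>
    fields.foldl (fun names field =>
      PAs.foldl (fun names PA =>
        Ss.foldl (fun names S =>
          if (S == "S2" || PA == "PA2") && field != "D56" then names
          else
            ways.foldl (fun names way =>
              if way == 1 then
                names ++ [ubername ++ "_" ++ PySem.Int.toStr band ++ "_" ++ field ++ "_" ++ PA
                            ++ "_" ++ S ++ "_" ++ (PySem.Int.toStr way ++ "way")]
              else
                (PySem.List.pyRange 0 way 1).foldl (fun names i =>
                  names ++ [ubername ++ "_" ++ PySem.Int.toStr band ++ "_" ++ field ++ "_" ++ PA
                              ++ "_" ++ S ++ "_" ++ (PySem.Int.toStr way ++ "way") ++ "_"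
                              ++ ("split" ++ PySem.Int.toStr i)]) names) names) names) names) names) []

-- ===== PORT B =====
-- Stage 1: the flat way/split token table.
def wayTokens (ways : List Int) : List String :=
  ways.foldl (fun toks way =>
    if way == 1 then toks ++ [PySem.Int.toStr way ++ "way"]
    else toks ++ (PySem.List.pyRange 0 way 1).map
            (fun i => PySem.Int.toStr way ++ "way_split" ++ PySem.Int.toStr i)) []

-- Stage 2: the band-independent suffix table with per-field prefiltered PA/S lists.
def suffixTable (fields PAs Ss toks : List String) : List String :=
  fields.foldl (fun sufs field =>
    let pas := if field == "D56" then PAs else PAs.filter (fun p => p != "PA2")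
    let ss := if field == "D56" then Ss else Ss.filter (fun s => s != "S2")
    sufs ++ pas.flatMap (fun pa => ss.flatMap (fun s =>
      toks.map (fun t => PySem.Str.join "_" [field, pa, s, t])))) []

def get_basenames_alt (ubername : String) (bands : List Int) (fields : List String) (PAs : List String) (Ss : List String) (ways : List Int) : List String :=
  let toks := wayTokens ways
  let sufs := suffixTable fields PAs Ss toks
  bands.flatMap (fun band => sufs.map (fun suf =>
    ubername ++ "_" ++ PySem.Int.toStr band ++ "_" ++ suf))

-- ===== PRECONDITION & SPEC =====
def Spec_get_basenames (ubername : String) (bands : List Int) (fields : List String) (PAs : List String) (Ss : List String) (ways : List Int) (out : List String) : Prop := out = get_basenames_alt ubername bands fields PAs Ss ways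
instance (ubername : String) (bands : List Int) (fields : List String) (PAs : List String) (Ss : List String) (ways : List Int) (out : List String) : Decidable (Spec_get_basenames ubername bands fields PAs Ss ways out) := by unfold Spec_get_basenames; infer_instance

-- ===== CLAIM (what is proved, stated in full; the proofs are below) =====
def Claim_equal_get_basenames : Prop := ∀ (ubername : String) (bands : List Int) (fields : List String) (PAs : List String) (Ss : List String) (ways : List Int), Dom_get_basenames ubername bands fields PAs Ss ways → Spec_get_basenames ubername bands fields PAs Ss ways (get_basenames ubername bands fields PAs Ss ways)

-- ===== LEMMAS AND PROOFS =====

-- the per-way token list, as a function (wayTokens is its flatMap)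
def tokOf (way : Int) : List String :=
  if way == 1 then [PySem.Int.toStr way ++ "way"]
  else (PySem.List.pyRange 0 way 1).map
          (fun i => PySem.Int.toStr way ++ "way_split" ++ PySem.Int.toStr i)

lemma wayTokens_eq (ways : List Int) : wayTokens ways = ways.flatMap tokOf := by
  unfold wayTokens
  have h : (fun (toks : List String) (way : Int) =>
      if way == 1 then toks ++ [PySem.Int.toStr way ++ "way"]
      else toks ++ (PySem.List.pyRange 0 way 1).map
              (fun i => PySem.Int.toStr way ++ "way_split" ++ PySem.Int.toStr i))
      = fun toks way => toks ++ tokOf way := by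
    funext toks way
    simp only [tokOf]
    split <;> rfl
  rw [h, PySem.List.foldl_append_eq_flatMap]
  simp

-- a foldl whose body appends a per-element block is the flatMap of the blocks
lemma foldl_shape {α : Type} (l : List α) (f : List String → α → List String)
    (g : α → List String) (h : ∀ names x, f names x = names ++ g x) (names : List String) :
    l.foldl f names = names ++ l.flatMap g := by
  have hf : f = fun names x => names ++ g x := funext fun n => funext fun x => h n x
  rw [hf, PySem.List.foldl_append_eq_flatMap]

-- flatMap with an if-filter body is the flatMap of the filtered list
lemma flatMap_if {α β : Type} (l : List α) (p : α → Bool) (g : α → List β) :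
    l.flatMap (fun x => if p x then g x else []) = (l.filter p).flatMap g := by
  induction l with
  | nil => rfl
  | cons a t ih => by_cases h : p a <;> simp [h, ih]

lemma split_str_eq (p a b : String) :
    p ++ "_" ++ (a ++ "way") ++ "_" ++ ("split" ++ b) = p ++ "_" ++ (a ++ "way_split" ++ b) := by
  apply String.toList_inj.mp
  simp [String.toList_append]

lemma prefix_join_eq (u b f p s t : String) :
    u ++ "_" ++ b ++ "_" ++ PySem.Str.join "_" [f, p, s, t]
      = u ++ "_" ++ b ++ "_" ++ f ++ "_" ++ p ++ "_" ++ s ++ "_" ++ t := by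
  apply String.toList_inj.mp
  simp [PySem.Str.join, PySem.Chars.join, List.intercalate, String.toList_append]

-- A's inner ways-loop appends exactly the token table, each token prefixed with pfx ++ "_"
lemma inner_eq (pfx : String) (ways : List Int) (names : List String) :
    ways.foldl (fun names way =>
      if way == 1 then names ++ [pfx ++ "_" ++ (PySem.Int.toStr way ++ "way")]
      else (PySem.List.pyRange 0 way 1).foldl (fun names i =>
          names ++ [pfx ++ "_" ++ (PySem.Int.toStr way ++ "way") ++ "_"
                      ++ ("split" ++ PySem.Int.toStr i)]) names) names
    = names ++ (ways.flatMap tokOf).map (fun tok => pfx ++ "_" ++ tok) := by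
  rw [List.map_flatMap]
  apply foldl_shape
  intro names way
  by_cases hw : way == 1
  · simp [hw, tokOf]
  · simp only [hw, if_false, tokOf, Bool.false_eq_true]
    rw [PySem.List.foldl_append_singleton_eq_map]
    simp [split_str_eq]

-- per-field block of the suffix table
def sufOf (PAs Ss toks : List String) (field : String) : List String :=
  (if field == "D56" then PAs else PAs.filter (fun p => p != "PA2")).flatMap (fun pa =>
    (if field == "D56" then Ss else Ss.filter (fun s => s != "S2")).flatMap (fun s =>
      toks.map (fun t => PySem.Str.join "_" [field, pa, s, t])))

lemma suffixTable_eq (fields PAs Ss toks : List String) :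
    suffixTable fields PAs Ss toks = fields.flatMap (sufOf PAs Ss toks) := by
  unfold suffixTable
  rw [foldl_shape (g := sufOf PAs Ss toks)]
  · simp
  · intro names field
    rfl

-- A's filtered PA/S double loop for one band and field equals B's prefiltered suffix block, prefixed
lemma field_eq (u : String) (b : Int) (f : String) (PAs Ss toks : List String) :
    PAs.flatMap (fun PA => Ss.flatMap (fun S =>
        if !((S == "S2" || PA == "PA2") && f != "D56") then
          toks.map (fun tok => u ++ "_" ++ PySem.Int.toStr b ++ "_" ++ f ++ "_" ++ PA
                                  ++ "_" ++ S ++ "_" ++ tok)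
        else []))
      = (sufOf PAs Ss toks f).map (fun suf => u ++ "_" ++ PySem.Int.toStr b ++ "_" ++ suf) := by
  unfold sufOf
  by_cases hf : f == "D56"
  · have h0 : (f != "D56") = false := by simp [bne, hf]
    simp only [hf, if_true, h0, Bool.and_false, Bool.not_false, List.map_flatMap, List.map_map]
    congr 1; funext PA; congr 1; funext S; congr 1; funext t
    simp [Function.comp, prefix_join_eq]
  · have hne : (f != "D56") = true := by simp [bne]; simpa using hf
    simp only [hf, if_false, hne, Bool.and_true, Bool.false_eq_true]
    have h1 : (fun PA => Ss.flatMap (fun S =>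
          if !(S == "S2" || PA == "PA2") then
            toks.map (fun tok => u ++ "_" ++ PySem.Int.toStr b ++ "_" ++ f ++ "_" ++ PA
                                    ++ "_" ++ S ++ "_" ++ tok)
          else []))
        = (fun PA => if PA != "PA2" then
            Ss.flatMap (fun S => if S != "S2" then
              toks.map (fun tok => u ++ "_" ++ PySem.Int.toStr b ++ "_" ++ f ++ "_" ++ PA
                                      ++ "_" ++ S ++ "_" ++ tok)
              else [])
            else []) := by
      funext PA
      by_cases hp : PA == "PA2"
      · have hP : PA = "PA2" := by simpa using hp
        subst hP
        simp
      · simp [hp, bne]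
    rw [h1, flatMap_if, List.map_flatMap]
    congr 1; funext PA
    rw [flatMap_if, List.map_flatMap]
    congr 1; funext S
    rw [List.map_map]
    congr 1; funext t
    simp [Function.comp, prefix_join_eq]

theorem get_basenames_spec_aux (ubername : String) (bands : List Int) (fields : List String)
    (PAs : List String) (Ss : List String) (ways : List Int) :
    get_basenames ubername bands fields PAs Ss ways
      = get_basenames_alt ubername bands fields PAs Ss ways := by
  unfold get_basenames get_basenames_alt
  dsimp only
  rw [suffixTable_eq, wayTokens_eq]
  rw [foldl_shape (g := fun band =>
        (fields.flatMap (sufOf PAs Ss (ways.flatMap tokOf))).map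
          (fun suf => ubername ++ "_" ++ PySem.Int.toStr band ++ "_" ++ suf))]
  · simp
  intro names band
  rw [List.map_flatMap]
  rw [foldl_shape (g := fun field =>
        (sufOf PAs Ss (ways.flatMap tokOf) field).map
          (fun suf => ubername ++ "_" ++ PySem.Int.toStr band ++ "_" ++ suf))]
  intro names field
  rw [← field_eq ubername band field PAs Ss (ways.flatMap tokOf)]
  rw [foldl_shape (g := fun PA => Ss.flatMap (fun S =>
        if !((S == "S2" || PA == "PA2") && field != "D56") then
          (ways.flatMap tokOf).map (fun tok => ubername ++ "_" ++ PySem.Int.toStr band ++ "_"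
            ++ field ++ "_" ++ PA ++ "_" ++ S ++ "_" ++ tok)
        else []))]
  intro names PA
  rw [foldl_shape (g := fun S =>
        if !((S == "S2" || PA == "PA2") && field != "D56") then
          (ways.flatMap tokOf).map (fun tok => ubername ++ "_" ++ PySem.Int.toStr band ++ "_"
            ++ field ++ "_" ++ PA ++ "_" ++ S ++ "_" ++ tok)
        else [])]
  intro names S
  by_cases hc : ((S == "S2" || PA == "PA2") && field != "D56") = true
  · simp [hc]
  · simp only [hc, Bool.not_false, if_true, Bool.false_eq_true, if_false]
    rw [inner_eq (ubername ++ "_" ++ PySem.Int.toStr band ++ "_" ++ field ++ "_" ++ PA ++ "_" ++ S)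
          ways names]

-- ===== VERDICT (by name: the statement is the Claim_ definition above) =====
theorem get_basenames_spec : Claim_equal_get_basenames := by
  intro ubername bands fields PAs Ss ways _
  unfold Spec_get_basenames
  exact get_basenames_spec_aux ubername bands fields PAs Ss ways
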